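-- pv_equiv track=rewrite | github.com/pypi-data/pypi-mirror-360 | packages/geomob/geomob-0.1.1.tar.gz/geomob-0.1.1/geomob/tessellate.py | _get_adjacent_geohashes
-- ===== SOURCE A (Python) =====
-- def _get_adjacent_geohashes(geohash, direct):
--
--         _base32 = '0123456789bcdefghjkmnpqrstuvwxyz'
--
--         neighboring_hashes = { "right"  : { "even" : "bc01fg45238967deuvhjyznpkmstqrwx",
--                                             "odd"  : "p0r21436x8zb9dcf5h7kjnmqesgutwvy" },
--                                "left"   : { "even" : "238967debc01fg45kmstqrwxuvhjyznp",
--                                             "odd"  : "14365h7k9dcfesgujnmqp0r2twvyx8zb" },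
--                                "top"    : { "even" : "p0r21436x8zb9dcf5h7kjnmqesgutwvy",
--                                             "odd"  : "bc01fg45238967deuvhjyznpkmstqrwx" },
--                                "bottom" : { "even" : "14365h7k9dcfesgujnmqp0r2twvyx8zb",
--                                             "odd"  : "238967debc01fg45kmstqrwxuvhjyznp" } }
--
--         # Used change of parent tile
--         borders   = { "right"  : {  "even" : "bcfguvyz", "odd"  : "prxz" },
--                       "left"   : {  "even" : "0145hjnp", "odd"  : "028b"  },
--                       "top"    : {  "even" : "prxz",     "odd"  : "bcfguvyz" },
--                       "bottom" : {  "even" : "028b",     "odd"  : "0145hjnp" } }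
--
--         if (len(geohash) == 0):
--             raise ValueError("The geohash length cannot be 0. Possible when close to poles")
--         srcHash = geohash.lower()
--         lastChr = srcHash[-1]
--         base = srcHash[:-1]
--
--         splitDirection = ['even', 'odd'][len(srcHash)%2]
--
--         if lastChr in borders[direct][splitDirection]:
--             base = _get_adjacent_geohashes(base, direct)
--
--         return base + _base32[neighboring_hashes[direct][splitDirection].index(lastChr)]
-- ===== SOURCE B (Python) =====
-- def _get_adjacent_geohashes(geohash, direct):
--
--     _base32 = '0123456789bcdefghjkmnpqrstuvwxyz'
--
--     neighboring_hashes = { "right"  : { "even" : "bc01fg45238967deuvhjyznpkmstqrwx",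
--                                         "odd"  : "p0r21436x8zb9dcf5h7kjnmqesgutwvy" },
--                            "left"   : { "even" : "238967debc01fg45kmstqrwxuvhjyznp",
--                                         "odd"  : "14365h7k9dcfesgujnmqp0r2twvyx8zb" },
--                            "top"    : { "even" : "p0r21436x8zb9dcf5h7kjnmqesgutwvy",
--                                         "odd"  : "bc01fg45238967deuvhjyznpkmstqrwx" },
--                            "bottom" : { "even" : "14365h7k9dcfesgujnmqp0r2twvyx8zb",
--                                         "odd"  : "238967debc01fg45kmstqrwxuvhjyznp" } }
--
--     borders   = { "right"  : {  "even" : "bcfguvyz", "odd"  : "prxz" },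
--                   "left"   : {  "even" : "0145hjnp", "odd"  : "028b"  },
--                   "top"    : {  "even" : "prxz",     "odd"  : "bcfguvyz" },
--                   "bottom" : {  "even" : "028b",     "odd"  : "0145hjnp" } }
--
--     if len(geohash) == 0:
--         raise ValueError("The geohash length cannot be 0. Possible when close to poles")
--     src = geohash.lower()
--     out = []
--     i = len(src) - 1
--     parity = ['even', 'odd'][len(src) % 2]
--     while True:
--         ch = src[i]
--         out.append(_base32[neighboring_hashes[direct][parity].index(ch)])
--         if ch not in borders[direct][parity]:
--             break
--         i -= 1
--         if i < 0:
--             raise ValueError("The geohash length cannot be 0. Possible when close to poles")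
--         parity = 'odd' if parity == 'even' else 'even'
--     return src[:i] + ''.join(reversed(out))
-- ===== Notes on version B (the rewrite author's own statement) =====
-- stated objective: alternative
-- what changed: A's right-to-left recursion (recurse on the prefix when the last character is a border char) is rewritten as an explicit iterative loop over the characters from the end, maintaining a flipping parity flag and accumulating the translated suffix, keeping the remaining prefix verbatim when the carry stops.
import Mathlib
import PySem

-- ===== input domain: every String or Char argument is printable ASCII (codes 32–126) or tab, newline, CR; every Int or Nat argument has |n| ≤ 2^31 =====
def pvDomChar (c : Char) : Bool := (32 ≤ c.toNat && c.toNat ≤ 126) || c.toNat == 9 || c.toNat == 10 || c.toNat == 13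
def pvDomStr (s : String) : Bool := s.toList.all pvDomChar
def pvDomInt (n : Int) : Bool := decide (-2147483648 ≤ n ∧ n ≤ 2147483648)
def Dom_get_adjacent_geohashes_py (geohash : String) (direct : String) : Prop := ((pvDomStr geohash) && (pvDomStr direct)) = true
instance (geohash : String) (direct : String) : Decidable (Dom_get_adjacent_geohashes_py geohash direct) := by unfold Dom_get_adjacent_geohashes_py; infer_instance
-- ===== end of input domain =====

-- B replaces A's recursion by an explicit right-to-left loop with a parity flag; objective: alternative (same cost).
-- Shared constant tables (the Python dict literals; parity 'even'/'odd' is the Bool odd flag).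
def pvBase32 : List Char := "0123456789bcdefghjkmnpqrstuvwxyz".toList

def pvNeigh (direct : String) (odd : Bool) : List Char :=
  if direct = "right" then (if odd then "p0r21436x8zb9dcf5h7kjnmqesgutwvy".toList else "bc01fg45238967deuvhjyznpkmstqrwx".toList)
  else if direct = "left" then (if odd then "14365h7k9dcfesgujnmqp0r2twvyx8zb".toList else "238967debc01fg45kmstqrwxuvhjyznp".toList)
  else if direct = "top" then (if odd then "bc01fg45238967deuvhjyznpkmstqrwx".toList else "p0r21436x8zb9dcf5h7kjnmqesgutwvy".toList)
  else if direct = "bottom" then (if odd then "238967debc01fg45kmstqrwxuvhjyznp".toList else "14365h7k9dcfesgujnmqp0r2twvyx8zb".toList)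
  else []  -- Python: KeyError (excluded by Pre_)

def pvBord (direct : String) (odd : Bool) : List Char :=
  if direct = "right" then (if odd then "prxz".toList else "bcfguvyz".toList)
  else if direct = "left" then (if odd then "028b".toList else "0145hjnp".toList)
  else if direct = "top" then (if odd then "bcfguvyz".toList else "prxz".toList)
  else if direct = "bottom" then (if odd then "0145hjnp".toList else "028b".toList)
  else []  -- Python: KeyError (excluded by Pre_)

-- _base32[neighboring_hashes[direct][parity].index(c)] ; '?' stands for the ValueError of .index (excluded by Pre_)
def pvTranslate (direct : String) (odd : Bool) (c : Char) : Char :=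
  match (pvNeigh direct odd).idxOf? c with
  | some i => pvBase32.getD i '?'
  | none => '?'

-- ===== PORT A =====
-- A's recursion on the (already lowered) character list; Python's `.lower()` at each level is
-- idempotent, so lowering once at the top (in get_adjacent_geohashes_py) computes the same values.
def pvARec (direct : String) (src : List Char) : List Char :=
  if h : src = [] then []  -- Python: raise ValueError (excluded by Pre_)
  else
    let odd : Bool := decide (src.length % 2 = 1)
    let lastChr := src.getLastD ' '
    let base := src.dropLast
    let base' := if lastChr ∈ pvBord direct odd then pvARec direct base else base
    base' ++ [pvTranslate direct odd lastChr]
termination_by src.length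
decreasing_by
  have : src.length ≠ 0 := by simpa using h
  simp [List.length_dropLast]; omega

def get_adjacent_geohashes_py (geohash : String) (direct : String) : String :=
  String.mk (pvARec direct (PySem.Str.lower geohash).toList)

-- ===== PORT B =====
-- Source B's while-loop, right to left over the reversed characters; `out` accumulates the translated
-- suffix (prepended, so it is already Source B's `reversed(out)`); when the loop breaks, the untouched
-- prefix `rest.reverse` (= src[:i]) is kept verbatim.
def pvBLoop (direct : String) (rev : List Char) (odd : Bool) (out : List Char) : List Char :=
  match rev with
  | [] => out  -- Python: raise ValueError (excluded by Pre_)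
  | ch :: rest =>
    let out' := pvTranslate direct odd ch :: out
    if ch ∈ pvBord direct odd then pvBLoop direct rest (!odd) out'
    else rest.reverse ++ out'

def get_adjacent_geohashes_py_alt (geohash : String) (direct : String) : String :=
  let src := (PySem.Str.lower geohash).toList
  String.mk (pvBLoop direct src.reverse (decide (src.length % 2 = 1)) [])

-- ===== PRECONDITION & SPEC =====
-- Pre_ excludes exactly the inputs where Python A raises: KeyError for a direction other than the
-- four keys, ValueError for an empty geohash or when the border carry walks past the first character,
-- and the ValueError of .index when a processed character (one whose whole right-suffix carries) is
-- not a base-32 character.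
def Pre_get_adjacent_geohashes_py (geohash : String) (direct : String) : Prop :=
  (direct = "right" ∨ direct = "left" ∨ direct = "top" ∨ direct = "bottom") ∧
  (let src := (PySem.Str.lower geohash).toList;
   src ≠ [] ∧
   (∃ i : Fin src.length, src.get i ∉ pvBord direct (decide ((i.val + 1) % 2 = 1))) ∧
   (∀ i : Fin src.length,
      (∀ j : Fin src.length, i < j → src.get j ∈ pvBord direct (decide ((j.val + 1) % 2 = 1))) →
      src.get i ∈ pvBase32))
instance (geohash : String) (direct : String) : Decidable (Pre_get_adjacent_geohashes_py geohash direct) := by unfold Pre_get_adjacent_geohashes_py; infer_instance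

def pvWitness_get_adjacent_geohashes_py : String × String := ("ezs42", "right")

def Spec_get_adjacent_geohashes_py (geohash : String) (direct : String) (out : String) : Prop := out = get_adjacent_geohashes_py_alt geohash direct
instance (geohash : String) (direct : String) (out : String) : Decidable (Spec_get_adjacent_geohashes_py geohash direct out) := by unfold Spec_get_adjacent_geohashes_py; infer_instance

-- ===== CLAIM (what is proved, stated in full; the proofs are below) =====
def Claim_equal_get_adjacent_geohashes_py : Prop := ∀ (geohash : String) (direct : String), Dom_get_adjacent_geohashes_py geohash direct → Pre_get_adjacent_geohashes_py geohash direct → Spec_get_adjacent_geohashes_py geohash direct (get_adjacent_geohashes_py geohash direct)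

-- ===== LEMMAS AND PROOFS =====

lemma pvARec_concat (direct : String) (base : List Char) (c : Char) :
    pvARec direct (base ++ [c]) =
      (if c ∈ pvBord direct (decide ((base.length + 1) % 2 = 1)) then pvARec direct base else base)
        ++ [pvTranslate direct (decide ((base.length + 1) % 2 = 1)) c] := by
  rw [pvARec]
  simp

lemma pvLoop_eq (direct : String) (src : List Char) :
    ∀ out : List Char,
      pvBLoop direct src.reverse (decide (src.length % 2 = 1)) out = pvARec direct src ++ out := by
  induction src using List.reverseRecOn with
  | nil => intro out; simp [pvBLoop, pvARec]
  | append_singleton base c ih =>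
    intro out
    rw [pvARec_concat]
    have hpar : (decide (base.length % 2 = 1)) = !(decide ((base.length + 1) % 2 = 1)) := by
      rcases Nat.even_or_odd base.length with h | h
      · simp [Nat.even_iff.mp h, Nat.add_mod]
      · simp [Nat.odd_iff.mp h, Nat.add_mod]
    simp only [List.reverse_append, List.reverse_singleton, List.singleton_append,
      List.length_append, List.length_singleton, pvBLoop]
    split_ifs with hb
    · rw [← hpar, ih]
      simp
    · simp

-- ===== VERDICT (by name: the statement is the Claim_ definition above) =====
theorem get_adjacent_geohashes_py_spec : Claim_equal_get_adjacent_geohashes_py := by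
  intro geohash direct _ _
  unfold Spec_get_adjacent_geohashes_py get_adjacent_geohashes_py get_adjacent_geohashes_py_alt
  simp only [pvLoop_eq, List.append_nil]
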